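-- pv_equiv track=rewrite | github.com/asr4memory/asr-transcribe | writers.py | prepare_segments_for_template
-- ===== SOURCE A (Python) =====
-- def prepare_segments_for_template(segments: list) -> list:
--     """
--     Transform the segment data for the template that is used for
--     creating the PDF file.
--     """
--     segments_for_template = []
--     last_speaker = ""
--     for segment in segments:
--         new_segment = {"text": segment["text"]}
--         speaker = segment.get("speaker", "")
--         if speaker != last_speaker:
--             new_segment["speaker"] = speaker
--             last_speaker = speaker
--         segments_for_template.append(new_segment)
--
--     return segments_for_template
-- ===== SOURCE B (Python) =====
-- def prepare_segments_for_template(segments: list) -> list: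
--     """Stateless re-formulation: a segment gets a 'speaker' entry exactly when
--     its speaker differs from the previous segment's speaker ('' before the first),
--     so map over segments zipped with the shifted speaker list."""
--     speakers = [seg.get("speaker", "") for seg in segments]
--     return [
--         {"text": seg["text"], "speaker": spk} if spk != prev else {"text": seg["text"]}
--         for seg, spk, prev in zip(segments, speakers, [""] + speakers)
--     ]
-- ===== Notes on version B (the rewrite author's own statement) =====
-- stated objective: simpler
-- what changed: The stateful loop with a last_speaker accumulator is replaced by a stateless comprehension over segments zipped with the shifted speaker list, using the fact that last_speaker always equals the previous segment's speaker.
import Mathlib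
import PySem

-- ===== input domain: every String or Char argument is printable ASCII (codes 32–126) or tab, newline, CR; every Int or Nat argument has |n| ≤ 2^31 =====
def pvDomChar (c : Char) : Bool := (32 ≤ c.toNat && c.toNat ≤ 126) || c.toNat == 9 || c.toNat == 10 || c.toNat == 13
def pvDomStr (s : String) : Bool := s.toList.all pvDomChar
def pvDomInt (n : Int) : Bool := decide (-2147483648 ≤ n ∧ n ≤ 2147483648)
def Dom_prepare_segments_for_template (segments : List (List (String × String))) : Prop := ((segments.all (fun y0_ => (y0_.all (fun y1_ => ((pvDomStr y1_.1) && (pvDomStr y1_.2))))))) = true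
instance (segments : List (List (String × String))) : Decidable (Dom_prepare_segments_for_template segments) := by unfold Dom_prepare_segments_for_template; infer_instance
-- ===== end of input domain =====

-- B replaces A's stateful last_speaker loop by a stateless map over segments
-- zipped with the shifted speaker list (objective: simpler).


-- ===== PORT A =====
-- segment["text"]: KeyError (get? = none) is excluded by Pre_; .getD "" is never reached there.
def pvTextOf (seg : List (String × String)) : String :=
  ((PySem.Dict.ofList seg).get? "text").getD ""

-- segment.get("speaker", "")
def pvSpkOf (seg : List (String × String)) : String :=
  (PySem.Dict.ofList seg).getD "speaker" ""

-- the for-loop, as structural recursion over the segments with the last_speaker state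
def pvLoopA (last : String) : List (List (String × String)) → List (List (String × String))
  | [] => []
  | seg :: rest =>
    let speaker := pvSpkOf seg
    if speaker ≠ last then
      (("text", pvTextOf seg) :: [("speaker", speaker)]) :: pvLoopA speaker rest
    else
      [("text", pvTextOf seg)] :: pvLoopA last rest

def prepare_segments_for_template (segments : List (List (String × String))) : List (List (String × String)) :=
  pvLoopA "" segments

-- ===== PORT B =====
def prepare_segments_for_template_alt (segments : List (List (String × String))) : List (List (String × String)) :=
  let speakers := segments.map pvSpkOf
  (segments.zip (speakers.zip ("" :: speakers))).map (fun p =>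
    if p.2.1 ≠ p.2.2 then [("text", pvTextOf p.1), ("speaker", p.2.1)]
    else [("text", pvTextOf p.1)])

-- ===== PRECONDITION & SPEC =====
-- Pre_ excludes exactly the segments without a "text" key, on which Python A raises KeyError.
def Pre_prepare_segments_for_template (segments : List (List (String × String))) : Prop :=
  (segments.all (fun seg => ((PySem.Dict.ofList seg).get? "text").isSome)) = true

instance (segments : List (List (String × String))) : Decidable (Pre_prepare_segments_for_template segments) := by
  unfold Pre_prepare_segments_for_template; infer_instance

def pvWitness_prepare_segments_for_template : (List (List (String × String))) :=
  [[("text", "hello"), ("speaker", "A")], [("text", "again"), ("speaker", "A")], [("text", "bye"), ("speaker", "B")]]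

def Spec_prepare_segments_for_template (segments : List (List (String × String))) (out : List (List (String × String))) : Prop := out = prepare_segments_for_template_alt segments
instance (segments : List (List (String × String))) (out : List (List (String × String))) : Decidable (Spec_prepare_segments_for_template segments out) := by unfold Spec_prepare_segments_for_template; infer_instance

-- ===== CLAIM (what is proved, stated in full; the proofs are below) =====
def Claim_equal_prepare_segments_for_template : Prop := ∀ (segments : List (List (String × String))), Dom_prepare_segments_for_template segments → Pre_prepare_segments_for_template segments → Spec_prepare_segments_for_template segments (prepare_segments_for_template segments)

-- ===== LEMMAS AND PROOFS =====
-- The loop of A, started from any last speaker, is B's zipped map with that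
-- speaker in front of the shifted speaker list.
theorem pvLoopA_eq_zipMap (segs : List (List (String × String))) : ∀ (last : String),
    pvLoopA last segs =
      (segs.zip ((segs.map pvSpkOf).zip (last :: segs.map pvSpkOf))).map (fun p =>
        if p.2.1 ≠ p.2.2 then [("text", pvTextOf p.1), ("speaker", p.2.1)]
        else [("text", pvTextOf p.1)]) := by
  induction segs with
  | nil => intro last; rfl
  | cons seg rest ih =>
    intro last
    by_cases h : pvSpkOf seg = last
    · subst h
      simp [pvLoopA, List.zip_cons_cons, ih]
    · simp only [pvLoopA, List.map_cons, List.zip_cons_cons, ih (pvSpkOf seg)]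
      simp [h]

-- ===== VERDICT (by name: the statement is the Claim_ definition above) =====
theorem prepare_segments_for_template_spec : Claim_equal_prepare_segments_for_template := by
  intro segments _ _
  unfold Spec_prepare_segments_for_template prepare_segments_for_template prepare_segments_for_template_alt
  exact pvLoopA_eq_zipMap segments ""
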